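-- pv_equiv track=rewrite | github.com/Cracked-Fisko/picoCFT | find_password.py | generate_original_password
-- ===== SOURCE A (Python) =====
-- def reverse_transform_character(c, i_1):
--     # This function reverses the transformation of a single character
--     for a in range(26):  # Try all possible shifts for 'a' to 'z'
--         # Calculate uVar1 as per the original code
--         uVar1 = (i_1 % 0xff >> 1 & 0x55) + (i_1 % 0xff & 0x55)
--         uVar1 = ((uVar1 >> 2) & 0x33) + (uVar1 & 0x33)
--
--         # Calculate the original input character
--         iVar2 = ord(c) - ord('a')
--         original_input = (iVar2 - (uVar1 >> 4) - (uVar1 & 0xf) + a) % 26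
--         original_input = (original_input + 26) % 26  # Ensure positive value
--         original_input += ord('a')  # Convert back to character
--
--         if 97 <= original_input <= 122:  # Ensure it falls in 'a' to 'z'
--             return chr(original_input)
--
-- def generate_original_password(output):
--     original_password = output
--     for _ in range(3):  # Reverse the transformation three times
--         new_password = ""
--         for i_1 in range(len(original_password)):
--             new_password += reverse_transform_character(original_password[i_1], i_1)
--         original_password = new_password
--     return original_password
-- ===== SOURCE B (Python) =====
-- def generate_original_password(output):
--     # One pass: the three reverse rounds compose into a single shift of
--     # 3 * popcount(i % 255) per character.
--     return ''.join(
--         chr((ord(c) - 97 - 3 * bin(i % 255).count('1')) % 26 + 97)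
--         for i, c in enumerate(output)
--     )
-- ===== Notes on version B (the rewrite author's own statement) =====
-- stated objective: faster
-- what changed: Replaces the three sequential reverse rounds (each rebuilding the string character by character via a 26-iteration trial loop that always succeeds at its first iteration) with a single pass over enumerate(output) applying one closed-form shift of 3*popcount(i%255) per character.
import Mathlib
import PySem

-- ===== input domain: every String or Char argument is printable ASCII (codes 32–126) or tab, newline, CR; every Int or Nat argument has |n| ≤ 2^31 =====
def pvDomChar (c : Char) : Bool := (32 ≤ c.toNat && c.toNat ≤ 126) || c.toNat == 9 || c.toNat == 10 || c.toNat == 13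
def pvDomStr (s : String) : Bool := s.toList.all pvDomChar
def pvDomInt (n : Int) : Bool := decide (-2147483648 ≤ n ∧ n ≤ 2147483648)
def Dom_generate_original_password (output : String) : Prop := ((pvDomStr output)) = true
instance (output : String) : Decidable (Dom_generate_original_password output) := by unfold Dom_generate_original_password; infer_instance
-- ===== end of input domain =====

-- B fuses A's three reverse rounds into one pass shifting each character by 3*popcount(i%255); objective: faster (measured constant-factor).

-- ===== PORT A =====
-- "Calculate uVar1 as per the original code": the two uVar1 assignments
def pvUVar1 (i1 : Int) : Int :=
  let uVar1 := PySem.Int.band ((PySem.Int.mod i1 255) >>> 1) 85 + PySem.Int.band (PySem.Int.mod i1 255) 85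
  PySem.Int.band (uVar1 >>> 2) 51 + PySem.Int.band uVar1 51

-- the for-a loop of reverse_transform_character, returning the first shift landing in 'a'..'z'
-- (none = the loop falls through; unreachable — a = 0 always hits — Python would raise on the later concat)
def pvRevLoop (c : Char) (i1 : Int) : List Int → Option Char
  | [] => none
  | a :: rest =>
    let uVar1 := pvUVar1 i1
    let iVar2 : Int := (c.toNat : Int) - 97                  -- ord(c) - ord('a')
    let oi := PySem.Int.mod (iVar2 - (uVar1 >>> 4) - PySem.Int.band uVar1 15 + a) 26
    let oi := PySem.Int.mod (oi + 26) 26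
    let oi := oi + 97
    if 97 ≤ oi ∧ oi ≤ 122 then some (Char.ofNat oi.toNat)    -- chr, exact: oi ∈ [97,122]
    else pvRevLoop c i1 rest

def pvRevChar (c : Char) (i1 : Int) : Option Char :=
  pvRevLoop c i1 (PySem.List.pyRange 0 26 1)

-- one round: new_password built left to right over i_1 in range(len(...)); chars on the list side
def pvRound (l : List Char) : List Char :=
  (PySem.List.pyRange 0 (PySem.List.len l) 1).foldl
    (fun acc i1 => acc ++ [(pvRevChar (PySem.List.pyGetD l i1 'a') i1).getD 'a']) []
    -- the pyGetD / .getD 'a' defaults are unreachable guards (index in range; loop hits at a = 0)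

def generate_original_password (output : String) : String :=
  String.ofList ((List.range 3).foldl (fun orig _ => pvRound orig) output.toList)

-- ===== PORT B =====
def generate_original_password_alt (output : String) : String :=
  String.ofList ((PySem.List.enumerate output.toList).map
    (fun p => Char.ofNat
      ((PySem.Int.mod ((p.2.toNat : Int) - 97 - 3 * (PySem.Int.bitCount (PySem.Int.mod p.1 255) : Int)) 26 + 97).toNat)))

-- ===== PRECONDITION & SPEC =====
def Spec_generate_original_password (output : String) (out : String) : Prop := out = generate_original_password_alt output
instance (output : String) (out : String) : Decidable (Spec_generate_original_password output out) := by unfold Spec_generate_original_password; infer_instance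

-- ===== CLAIM (what is proved, stated in full; the proofs are below) =====
def Claim_equal_generate_original_password : Prop := ∀ (output : String), Dom_generate_original_password output → Spec_generate_original_password output (generate_original_password output)

-- ===== LEMMAS AND PROOFS =====

-- A's bit-twiddled shift is the popcount of i%255 (checked on all 255 residues)
set_option maxRecDepth 8192 in
theorem pvShift_eq (i1 : Int) :
    (pvUVar1 i1 >>> 4) + PySem.Int.band (pvUVar1 i1) 15
      = (PySem.Int.bitCount (PySem.Int.mod i1 255) : Int) := by
  have hm : PySem.Int.mod i1 255 = i1 % 255 := PySem.Int.mod_eq_emod_of_pos (by norm_num)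
  have hmt : i1 % 255 = (((i1 % 255).toNat : Nat) : Int) := by omega
  have key : ∀ n : Nat, n < 255 →
      (let u1 := PySem.Int.band (((n : Nat) : Int) >>> 1) 85 + PySem.Int.band (((n : Nat) : Int)) 85
       let u2 := PySem.Int.band (u1 >>> 2) 51 + PySem.Int.band u1 51
       (u2 >>> 4) + PySem.Int.band u2 15) = (PySem.Int.bitCount (((n : Nat) : Int)) : Int) := by
    decide
  rw [pvUVar1, hm, hmt]
  exact key (i1 % 255).toNat (by omega)

theorem pvRevChar_eq (c : Char) (i1 : Int) :
    pvRevChar c i1 =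
      some (Char.ofNat (((((c.toNat : Int) - 97) -
        (PySem.Int.bitCount (PySem.Int.mod i1 255) : Int)) % 26 + 97).toNat)) := by
  have h26 : PySem.List.pyRange 0 26 1 = 0 :: PySem.List.pyRange 1 26 1 :=
    PySem.List.pyRange_one_cons (by norm_num)
  rw [pvRevChar, h26]
  simp only [pvRevLoop]
  have hsh := pvShift_eq i1
  set s : Int := (PySem.Int.bitCount (PySem.Int.mod i1 255) : Int) with hs
  have hmod : ∀ a : Int, PySem.Int.mod a 26 = a % 26 := fun a =>
    PySem.Int.mod_eq_emod_of_pos (by norm_num)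
  simp only [hmod]
  rw [if_pos]
  · congr 2
    omega
  · constructor <;> omega

-- index-aware map (the shape both ports reduce to)
def pvMapi (f : Int → Char → Char) (s : Int) (l : List Char) : List Char :=
  (PySem.List.enumerate l s).map (fun p => f p.1 p.2)

theorem pvMapi_cons (f : Int → Char → Char) (s : Int) (x : Char) (xs : List Char) :
    pvMapi f s (x :: xs) = f s x :: pvMapi f (s + 1) xs := by
  simp [pvMapi, PySem.List.enumerate_cons]

theorem pvMapi_comp (f g : Int → Char → Char) (s : Int) (l : List Char) :
    pvMapi f s (pvMapi g s l) = pvMapi (fun i c => f i (g i c)) s l := by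
  induction l generalizing s with
  | nil => simp [pvMapi]
  | cons x xs ih => rw [pvMapi_cons, pvMapi_cons, pvMapi_cons, ih]

theorem pvFoldl_append_map {α β : Type} (f : α → β) (l : List α) (acc : List β) :
    l.foldl (fun a x => a ++ [f x]) acc = acc ++ l.map f := by
  induction l generalizing acc with
  | nil => simp
  | cons x xs ih => simp [ih]

-- A's step per (index, char)
def pvAStep (i : Int) (c : Char) : Char :=
  (pvRevChar c i).getD 'a'

theorem pvRound_eq_mapi (l : List Char) : pvRound l = pvMapi pvAStep 0 l := by
  rw [pvRound, pvMapi, PySem.List.enumerate_eq_map_pyRange l 'a', List.map_map]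
  rw [pvFoldl_append_map]
  simp [pvAStep]

-- B's step per (index, char)
def pvBStep (i : Int) (c : Char) : Char :=
  Char.ofNat ((PySem.Int.mod ((c.toNat : Int) - 97 - 3 * (PySem.Int.bitCount (PySem.Int.mod i 255) : Int)) 26 + 97).toNat)

-- three A-steps at the same index collapse to one B-step
theorem pvAStep_three (i : Int) (c : Char) :
    pvAStep i (pvAStep i (pvAStep i c)) = pvBStep i c := by
  have hmod : ∀ a : Int, PySem.Int.mod a 26 = a % 26 := fun a =>
    PySem.Int.mod_eq_emod_of_pos (by norm_num)
  set s : Int := (PySem.Int.bitCount (PySem.Int.mod i 255) : Int) with hs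
  have hstep : ∀ d : Char, pvAStep i d
      = Char.ofNat ((((d.toNat : Int) - 97 - s) % 26 + 97).toNat) := by
    intro d; rw [pvAStep, pvRevChar_eq]; rfl
  have hval : ∀ x : Int, 0 ≤ x → x ≤ 25 →
      ((Char.ofNat (x + 97).toNat).toNat : Int) = x + 97 := by
    intro x hx0 hx1
    interval_cases x <;> decide
  rw [hstep, hstep, hstep, pvBStep, hmod]
  have h1 : (0 : Int) ≤ ((c.toNat : Int) - 97 - s) % 26 := by omega
  have h2 : ((c.toNat : Int) - 97 - s) % 26 ≤ 25 := by omega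
  rw [hval _ h1 h2]
  have h3 : (0 : Int) ≤ (((c.toNat : Int) - 97 - s) % 26 + 97 - 97 - s) % 26 := by omega
  have h4 : (((c.toNat : Int) - 97 - s) % 26 + 97 - 97 - s) % 26 ≤ 25 := by omega
  rw [hval _ h3 h4]
  congr 2
  omega

-- ===== VERDICT (by name: the statement is the Claim_ definition above) =====
theorem generate_original_password_spec : Claim_equal_generate_original_password := by
  intro output _
  unfold Spec_generate_original_password generate_original_password generate_original_password_alt
  have h3 : (List.range 3).foldl (fun orig _ => pvRound orig) output.toList
      = pvRound (pvRound (pvRound output.toList)) := by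
    rw [show List.range 3 = [0, 1, 2] from rfl]
    simp only [List.foldl]
  rw [h3, pvRound_eq_mapi, pvRound_eq_mapi, pvRound_eq_mapi, pvMapi_comp, pvMapi_comp]
  have halt : (PySem.List.enumerate output.toList).map
      (fun p => Char.ofNat
        ((PySem.Int.mod ((p.2.toNat : Int) - 97 - 3 * (PySem.Int.bitCount (PySem.Int.mod p.1 255) : Int)) 26 + 97).toNat))
      = pvMapi pvBStep 0 output.toList := rfl
  rw [halt]
  unfold pvMapi
  refine congrArg String.ofList ?_
  apply List.map_congr_left
  intro p _
  exact pvAStep_three p.1 p.2
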